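-- pv_equiv track=rewrite | github.com/nicolashainaux/mathmaker | lib/wordings_handling_tools.py | process_attr_values
-- ===== SOURCE A (Python) =====
-- def wrap(opening_str, word, ending_str):
--     return opening_str + word + ending_str
--
-- def unwrapped(word):
--     if word.endswith('.') or word.endswith(',') \
--     or word.endswith(':') or word.endswith(';') \
--     or word.endswith('?') or word.endswith('!'):
--         return word[1:-2]
--     else:
--         return word[1:-1]
--
-- def is_wrapped(opening_str, word, ending_str):
--     return word.startswith(opening_str) and word.endswith(ending_str)
--
-- def is_wrapped_p(opening_str, word, ending_str):
--     return word.startswith(opening_str) \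
--            and (word.endswith(ending_str) \
--                 or word.endswith(ending_str + ".") \
--                 or word.endswith(ending_str + ",") \
--                 or word.endswith(ending_str + ":") \
--                 or word.endswith(ending_str + ";") \
--                 or word.endswith(ending_str + "?") \
--                 or word.endswith(ending_str + "!"))
--
-- def is_wrapped_P(opening_str, word, ending_str):
--     return word.startswith(opening_str) \
--            and (word.endswith(ending_str + ".") \
--                 or word.endswith(ending_str + ",") \
--                 or word.endswith(ending_str + ":") \
--                 or word.endswith(ending_str + ";") \
--                 or word.endswith(ending_str + "?") \
--                 or word.endswith(ending_str + "!"))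
--
-- def process_attr_values(sentence):
--     attr_values = {}
--     key_val_blocks = [ w for w in sentence.split() \
--                          if (is_wrapped_p("{", w, "}") \
--                              or is_wrapped_p("<", w, ">")) \
--                             and '=' in w ]
--     for kv in key_val_blocks:
--         [key, val] = unwrapped(kv).split(sep='=')
--         attr_values.update({key: val})
--     pairs_to_add = {}
--     for key in attr_values:
--         if key.startswith('area_unit') or key.startswith('volume_unit'):
--             _, unit_id = key.split(sep="_")
--             if not 'length_' + unit_id in attr_values:
--                 pairs_to_add.update({'length_' + unit_id: attr_values[key]})
--     attr_values.update(pairs_to_add)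
--     transformed_sentence = " ".join([ wrap("{", w[1:-1].split(sep='=')[0], "}")\
--                                       if (is_wrapped("{", w, "}") \
--                                           or is_wrapped("<", w, ">")) \
--                                          and '=' in w \
--                                       else w \
--                                       for w in sentence.split() ])
--     transformed_sentence = " ".join([ wrap("{", w[1:-2].split(sep='=')[0],
--                                            "}" + w[-1:]) \
--                                       if (is_wrapped_P("{", w, "}") \
--                                           or is_wrapped_P("<", w, ">")) \
--                                          and '=' in w \
--                                       else w \
--                                       for w in transformed_sentence.split() ])
--     return (transformed_sentence, attr_values)
-- ===== SOURCE B (Python) =====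
-- # One pass over sentence.split(): classify each word once, building both the
-- # attribute dict and the transformed word list together (A makes three passes
-- # and re-splits the joined sentence).
--
-- _PUNCT = '.,:;?!'
--
--
-- def _classify(w, close):
--     """Return (inner, tail) if w is a wrapped key=value block, else None."""
--     if w.endswith(close):
--         return w[1:-1], '}'
--     if w[-1] in _PUNCT and w.endswith(close + w[-1]):
--         return w[1:-2], '}' + w[-1]
--     return None
--
--
-- def process_attr_values(sentence):
--     attrs = {}
--     out_words = []
--     for w in sentence.split():
--         res = None
--         if '=' in w:
--             if w.startswith('{'):
--                 res = _classify(w, '}')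
--             elif w.startswith('<'):
--                 res = _classify(w, '>')
--         if res is None:
--             out_words.append(w)
--         else:
--             inner, tail = res
--             key, val = inner.split('=')
--             attrs[key] = val
--             out_words.append('{' + key + tail)
--     to_add = {}
--     for key, val in attrs.items():
--         if key.startswith('area_unit') or key.startswith('volume_unit'):
--             _, unit_id = key.split('_')
--             lk = 'length_' + unit_id
--             if lk not in attrs:
--                 to_add[lk] = val
--     attrs.update(to_add)
--     return ' '.join(out_words), attrs
-- ===== Notes on version B (the rewrite author's own statement) =====
-- stated objective: simpler
-- what changed: B classifies each word once in a single pass over sentence.split(), building the attribute dict and the transformed word list together, instead of A's three separate scans (filter+loop for attributes, then two map/join/re-split passes over the sentence).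
import Mathlib
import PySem

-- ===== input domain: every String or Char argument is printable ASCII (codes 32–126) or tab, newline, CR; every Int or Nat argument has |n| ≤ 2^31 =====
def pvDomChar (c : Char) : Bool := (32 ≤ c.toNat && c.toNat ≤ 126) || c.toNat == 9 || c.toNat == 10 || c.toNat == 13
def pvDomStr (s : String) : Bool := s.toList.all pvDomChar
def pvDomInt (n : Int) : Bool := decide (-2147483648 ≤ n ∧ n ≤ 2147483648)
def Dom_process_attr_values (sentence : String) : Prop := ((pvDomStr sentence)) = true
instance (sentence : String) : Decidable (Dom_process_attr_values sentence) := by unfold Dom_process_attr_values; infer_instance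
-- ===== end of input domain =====

-- B makes ONE pass over sentence.split(), classifying each word once and building the attribute
-- dict and the transformed word list together, where A scans the words three times (a filtered
-- attribute loop, then two map/join/re-split transformation passes); objective: simpler.

-- ===== PORT A =====
def paPunctEnd (w : List Char) : Bool :=
  PySem.Chars.endswith w ['.'] || PySem.Chars.endswith w [','] ||
  PySem.Chars.endswith w [':'] || PySem.Chars.endswith w [';'] ||
  PySem.Chars.endswith w ['?'] || PySem.Chars.endswith w ['!']

def paUnwrapped (w : List Char) : List Char :=
  if paPunctEnd w then PySem.List.slice w (some 1) (some (-2))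
  else PySem.List.slice w (some 1) (some (-1))

def paIsWrapped (o : List Char) (w : List Char) (e : List Char) : Bool :=
  PySem.Chars.startswith w o && PySem.Chars.endswith w e

def paIsWrappedp (o : List Char) (w : List Char) (e : List Char) : Bool :=
  PySem.Chars.startswith w o &&
    (PySem.Chars.endswith w e || PySem.Chars.endswith w (e ++ ['.']) ||
     PySem.Chars.endswith w (e ++ [',']) || PySem.Chars.endswith w (e ++ [':']) ||
     PySem.Chars.endswith w (e ++ [';']) || PySem.Chars.endswith w (e ++ ['?']) ||
     PySem.Chars.endswith w (e ++ ['!']))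

def paIsWrappedP (o : List Char) (w : List Char) (e : List Char) : Bool :=
  PySem.Chars.startswith w o &&
    (PySem.Chars.endswith w (e ++ ['.']) || PySem.Chars.endswith w (e ++ [',']) ||
     PySem.Chars.endswith w (e ++ [':']) || PySem.Chars.endswith w (e ++ [';']) ||
     PySem.Chars.endswith w (e ++ ['?']) || PySem.Chars.endswith w (e ++ ['!']))

-- '[key, val] = unwrapped(kv).split(sep='=')' then 'attr_values.update({key: val})'
def paAttrStep (d : PySem.Dict (List Char) (List Char)) (kv : List Char) :
    PySem.Dict (List Char) (List Char) :=
  match PySem.Chars.splitOn (paUnwrapped kv) ['='] with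
  | [k, v] => d.insert k v
  | _ => d      -- Python raises ValueError here; excluded by Pre_

-- body of the 'for key in attr_values' loop building pairs_to_add
def paDeriveStep (attr : PySem.Dict (List Char) (List Char))
    (p : PySem.Dict (List Char) (List Char)) (k : List Char) :
    PySem.Dict (List Char) (List Char) :=
  if PySem.Chars.startswith k "area_unit".toList || PySem.Chars.startswith k "volume_unit".toList then
    match PySem.Chars.splitOn k ['_'] with
    | [_, uid] =>
        if attr.contains ("length_".toList ++ uid) then p
        else p.insert ("length_".toList ++ uid) (attr.getD k [])
    | _ => p   -- Python raises ValueError here; excluded by Pre_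
  else p

-- first transformation pass (wrap("{", w[1:-1].split('=')[0], "}"))
def paF1 (w : List Char) : List Char :=
  if (paIsWrapped ['{'] w ['}'] || paIsWrapped ['<'] w ['>']) && PySem.Chars.isIn ['='] w then
    '{' :: PySem.List.pyGetD (PySem.Chars.splitOn (PySem.List.slice w (some 1) (some (-1))) ['=']) 0 [] ++ ['}']
  else w

-- second transformation pass (wrap("{", w[1:-2].split('=')[0], "}" + w[-1:]))
def paF2 (w : List Char) : List Char :=
  if (paIsWrappedP ['{'] w ['}'] || paIsWrappedP ['<'] w ['>']) && PySem.Chars.isIn ['='] w then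
    '{' :: PySem.List.pyGetD (PySem.Chars.splitOn (PySem.List.slice w (some 1) (some (-2))) ['=']) 0 []
        ++ '}' :: PySem.List.slice w (some (-1)) none
  else w

def process_attr_values (sentence : String) : String × (List (String × String)) :=
  let words := PySem.Chars.split₀ sentence.toList
  let kvBlocks := words.filter
    (fun w => (paIsWrappedp ['{'] w ['}'] || paIsWrappedp ['<'] w ['>']) && PySem.Chars.isIn ['='] w)
  let attr1 := kvBlocks.foldl paAttrStep PySem.Dict.empty
  let pairsToAdd := attr1.keys.foldl (paDeriveStep attr1) PySem.Dict.empty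
  let attr := pairsToAdd.items.foldl (fun d kv => d.insert kv.1 kv.2) attr1
  let t1 := PySem.Chars.join [' '] (words.map paF1)
  let t2 := PySem.Chars.join [' '] ((PySem.Chars.split₀ t1).map paF2)
  (String.ofList t2, attr.items.map (fun kv => (String.ofList kv.1, String.ofList kv.2)))

-- ===== PORT B =====
def pbPunct : String := ".,:;?!"

-- Source B's _classify(w, close): (inner, tail) or None
def pbClassify (w : List Char) (close : Char) : Option (List Char × List Char) :=
  if PySem.Chars.endswith w [close] then
    some (PySem.List.slice w (some 1) (some (-1)), ['}'])
  else
    match PySem.List.pyGet? w (-1) with      -- w[-1]: words from split() are nonempty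
    | some c =>
        if PySem.Chars.isIn [c] pbPunct.toList && PySem.Chars.endswith w ([close] ++ [c]) then
          some (PySem.List.slice w (some 1) (some (-2)), ['}', c])
        else none
    | none => none

-- body of Source B's single 'for w in sentence.split()' loop
def pbStep (st : PySem.Dict (List Char) (List Char) × List (List Char)) (w : List Char) :
    PySem.Dict (List Char) (List Char) × List (List Char) :=
  let res : Option (List Char × List Char) :=
    if PySem.Chars.isIn ['='] w then
      if PySem.Chars.startswith w ['{'] then pbClassify w '}'
      else if PySem.Chars.startswith w ['<'] then pbClassify w '>'
      else none
    else none
  match res with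
  | none => (st.1, st.2 ++ [w])
  | some (inner, tail) =>
      match PySem.Chars.splitOn inner ['='] with
      | [k, v] => (st.1.insert k v, st.2 ++ ['{' :: k ++ tail])
      | _ => (st.1, st.2 ++ [w])   -- Python raises ValueError here; excluded by Pre_

-- body of Source B's 'for key, val in attrs.items()' loop
def pbDeriveStep (attrs : PySem.Dict (List Char) (List Char))
    (p : PySem.Dict (List Char) (List Char)) (kv : List Char × List Char) :
    PySem.Dict (List Char) (List Char) :=
  if PySem.Chars.startswith kv.1 "area_unit".toList || PySem.Chars.startswith kv.1 "volume_unit".toList then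
    match PySem.Chars.splitOn kv.1 ['_'] with
    | [_, uid] =>
        if attrs.contains ("length_".toList ++ uid) then p
        else p.insert ("length_".toList ++ uid) kv.2
    | _ => p   -- Python raises ValueError here; excluded by Pre_
  else p

def process_attr_values_alt (sentence : String) : String × (List (String × String)) :=
  let st := (PySem.Chars.split₀ sentence.toList).foldl pbStep (PySem.Dict.empty, [])
  let toAdd := st.1.items.foldl (pbDeriveStep st.1) PySem.Dict.empty
  let attrs := toAdd.items.foldl (fun d kv => d.insert kv.1 kv.2) st.1
  (String.ofList (PySem.Chars.join [' '] st.2),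
   attrs.items.map (fun kv => (String.ofList kv.1, String.ofList kv.2)))

-- ===== PRECONDITION & SPEC =====
def pvPunct : List Char := ['.', ',', ':', ';', '?', '!']

def pvIsBlock (o : Char) (c : Char) (w : List Char) : Bool :=
  PySem.Chars.startswith w [o] &&
    (PySem.Chars.endswith w [c] || pvPunct.any (fun p => PySem.Chars.endswith w [c, p]))

def pvInner (w : List Char) : List Char :=
  if pvPunct.any (fun p => PySem.Chars.endswith w [p]) then PySem.List.slice w (some 1) (some (-2))
  else PySem.List.slice w (some 1) (some (-1))

def pvKeyOK (k : List Char) : Prop :=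
  (PySem.Chars.startswith k "area_unit".toList || PySem.Chars.startswith k "volume_unit".toList) = true →
    (PySem.Chars.splitOn k ['_']).length = 2

def pvPreWord (w : List Char) : Prop :=
  ((pvIsBlock '{' '}' w || pvIsBlock '<' '>' w) && PySem.Chars.isIn ['='] w) = true →
    (PySem.Chars.splitOn (pvInner w) ['=']).length = 2 ∧
      pvKeyOK (PySem.List.pyGetD (PySem.Chars.splitOn (pvInner w) ['=']) 0 [])

-- Pre_ excludes exactly the sentences on which the Python raises ValueError: a wrapped
-- key=value block whose inside does not split at '=' into exactly two parts, or whose key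
-- starts with 'area_unit'/'volume_unit' but does not split at '_' into exactly two parts.
def Pre_process_attr_values (sentence : String) : Prop :=
  ∀ w ∈ PySem.Chars.split₀ sentence.toList, pvPreWord w

instance (sentence : String) : Decidable (Pre_process_attr_values sentence) := by
  unfold Pre_process_attr_values; unfold pvPreWord pvKeyOK; infer_instance

def pvWitness_process_attr_values : String := "Find the {area_unit=cm} of the <nb1=7> squares."

def Spec_process_attr_values (sentence : String) (out : String × (List (String × String))) : Prop :=
  out = process_attr_values_alt sentence
instance (sentence : String) (out : String × (List (String × String))) :
    Decidable (Spec_process_attr_values sentence out) := by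
  unfold Spec_process_attr_values; infer_instance

-- ===== CLAIM (what is proved, stated in full; the proofs are below) =====
def Claim_equal_process_attr_values : Prop :=
  ∀ (sentence : String), Dom_process_attr_values sentence → Pre_process_attr_values sentence →
    Spec_process_attr_values sentence (process_attr_values sentence)

-- ===== LEMMAS AND PROOFS =====



def Good (w : List Char) : Prop := w ≠ [] ∧ ∀ c ∈ w, PySem.Chars.isspace c = false

theorem go_good : ∀ (s cur acc : _), (∀ c ∈ cur, PySem.Chars.isspace c = false) →
    (∀ w ∈ acc, Good w) → ∀ w ∈ PySem.Chars.split₀.go s cur acc, Good w := by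
  intro s
  induction s with
  | nil =>
    intro cur acc hcur hacc w hw
    simp only [PySem.Chars.split₀.go] at hw
    split at hw
    · simp at hw; exact hacc _ hw
    · rename_i h
      simp at hw
      rcases hw with h1 | h2
      · exact hacc _ h1
      · subst h2
        exact ⟨by simpa using List.isEmpty_eq_false_iff.mp (by simpa using h), by simpa using hcur⟩
  | cons c rest ih =>
    intro cur acc hcur hacc w hw
    simp only [PySem.Chars.split₀.go] at hw
    split at hw
    · split at hw
      · exact ih [] acc (by simp) hacc w hw
      · rename_i hsp hne
        refine ih [] _ (by simp) ?_ w hw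
        intro u hu
        rcases List.mem_cons.mp hu with h1 | h2
        · subst h1
          exact ⟨by simpa using List.isEmpty_eq_false_iff.mp (by simpa using hne), by simpa using hcur⟩
        · exact hacc _ h2
    · rename_i hsp
      refine ih (c :: cur) acc ?_ hacc w hw
      intro u hu
      rcases List.mem_cons.mp hu with h1 | h2
      · subst h1; simpa using hsp
      · exact hcur _ h2

theorem split₀_good (s : List Char) : ∀ w ∈ PySem.Chars.split₀ s, Good w := by
  intro w hw
  exact go_good s [] [] (by simp) (by simp) w (by simpa [PySem.Chars.split₀] using hw)

-- go over a space-free word prefix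
theorem go_word (w : List Char) : ∀ (rest cur acc : _), (∀ c ∈ w, PySem.Chars.isspace c = false) →
    PySem.Chars.split₀.go (w ++ rest) cur acc = PySem.Chars.split₀.go rest (w.reverse ++ cur) acc := by
  induction w with
  | nil => intro rest cur acc _; simp
  | cons c cs ih =>
    intro rest cur acc h
    simp only [List.cons_append, PySem.Chars.split₀.go]
    rw [if_neg (by simpa using h c (by simp))]
    rw [ih rest (c :: cur) acc (fun x hx => h x (by simp [hx]))]
    simp

theorem join_split₀ : ∀ (ws : List (List Char)) (acc : List (List Char)),
    (∀ w ∈ ws, Good w) →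
    PySem.Chars.split₀.go (PySem.Chars.join [' '] ws) [] acc = acc.reverse ++ ws := by
  intro ws
  induction ws with
  | nil => intro acc h; simp [PySem.Chars.join, List.intercalate, PySem.Chars.split₀.go]
  | cons w ws ih =>
    intro acc h
    have hw := h w (by simp)
    cases ws with
    | nil =>
      have h1 : PySem.Chars.join [' '] [w] = w ++ [] := by simp [PySem.Chars.join, List.intercalate]
      rw [h1, go_word w [] [] acc hw.2]
      simp only [PySem.Chars.split₀.go]
      rw [if_neg (by simp [hw.1])]
      simp
    | cons v vs =>
      have : PySem.Chars.join [' '] (w :: v :: vs) = w ++ (' ' :: PySem.Chars.join [' '] (v :: vs)) := by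
        simp [PySem.Chars.join, List.intercalate]
      rw [this, go_word w _ [] acc hw.2]
      simp only [PySem.Chars.split₀.go]
      rw [if_pos (by decide)]
      rw [if_neg (by simp [hw.1])]
      rw [ih _ (fun x hx => h x (by simp [hx]))]
      simp

theorem split₀_join (ws : List (List Char)) (h : ∀ w ∈ ws, Good w) :
    PySem.Chars.split₀ (PySem.Chars.join [' '] ws) = ws := by
  simp [PySem.Chars.split₀, join_split₀ ws [] h]

theorem end1_eq (ys : List Char) (z p : Char) :
    PySem.Chars.endswith (ys ++ [z]) [p] = (z == p) := by
  rcases h : (z == p) with _ | _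
  · rcases h2 : PySem.Chars.endswith (ys ++ [z]) [p] with _ | _
    · rfl
    · rcases (PySem.Chars.endswith_iff _ _).mp h2 with ⟨t, ht⟩
      have h3 : t.concat p = ys.concat z := by
        rw [List.concat_eq_append, List.concat_eq_append]; exact ht
      simp [(List.concat_inj.mp h3).2] at h
  · have : z = p := by simpa using h
    subst this
    exact (PySem.Chars.endswith_iff _ _).mpr ⟨ys, rfl⟩

theorem end2_eq (ys : List Char) (z e p : Char) :
    PySem.Chars.endswith (ys ++ [z]) [e, p] = ((z == p) && PySem.Chars.endswith ys [e]) := by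
  rcases h2 : PySem.Chars.endswith (ys ++ [z]) [e, p] with _ | _
  · symm
    rcases hb : (z == p) && PySem.Chars.endswith ys [e] with _ | _
    · rfl
    · exfalso
      have ⟨hzp, hys⟩ := Bool.and_eq_true_iff.mp hb
      rcases (PySem.Chars.endswith_iff _ _).mp hys with ⟨t, ht⟩
      have hz : z = p := by simpa using hzp
      subst hz
      have : PySem.Chars.endswith (ys ++ [z]) [e, z] = true := by
        refine (PySem.Chars.endswith_iff _ _).mpr ⟨t, ?_⟩
        rw [← ht]; simp
      simp [this] at h2
  · rcases (PySem.Chars.endswith_iff _ _).mp h2 with ⟨t, ht⟩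
    have h3 : (t ++ [e]).concat p = ys.concat z := by
      rw [List.concat_eq_append, List.concat_eq_append]; simpa using ht
    have h4 := List.concat_inj.mp h3
    symm
    refine Bool.and_eq_true_iff.mpr ⟨by simp [h4.2], ?_⟩
    exact (PySem.Chars.endswith_iff _ _).mpr ⟨t, h4.1⟩

theorem start1_iff (w : List Char) (c : Char) :
    PySem.Chars.startswith w [c] = true ↔ w.head? = some c := by
  rw [PySem.Chars.startswith_iff]
  cases w with
  | nil => simp
  | cons a t => simp [List.cons_prefix_cons, eq_comm]

theorem isIn_singleton (c : Char) (s : List Char) :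
    PySem.Chars.isIn [c] s = true ↔ c ∈ s := by
  rw [PySem.Chars.isIn_iff_infix]
  constructor
  · intro ⟨t, u, h⟩
    rw [← h]; simp
  · intro h
    rcases List.append_of_mem h with ⟨s₁, s₂, rfl⟩
    exact ⟨s₁, s₂, by simp⟩

theorem start1_cons (a : Char) (t : List Char) (c : Char) :
    PySem.Chars.startswith (a :: t) [c] = (a == c) := by
  simp [PySem.Chars.startswith, List.isPrefixOf, Bool.beq_comm]

def pvACond (w : List Char) : Bool :=
  (paIsWrappedp ['{'] w ['}'] || paIsWrappedp ['<'] w ['>']) && PySem.Chars.isIn ['='] w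


theorem coreSuccBrace (st : PySem.Dict (List Char) (List Char) × List (List Char)) (ys : List Char) (z : Char)
    (hP : pvPreWord (ys ++ [z]))
    (hEq : PySem.Chars.isIn ['='] (ys ++ [z]) = true)
    (hO1 : PySem.Chars.startswith (ys ++ [z]) ['{'] = true)
    (hO2 : PySem.Chars.startswith (ys ++ [z]) ['<'] = false)
    (hys : PySem.Chars.endswith ys ['}'] = true)
    (hne : (z == '}') = false)
    (hor : ((z == '.') || (z == ',') || (z == ':') || (z == ';') || (z == '?') || (z == '!')) = true)
    (hin : PySem.Chars.isIn [z] pbPunct.toList = true) :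
    pbStep st (ys ++ [z]) =
      ((if pvACond (ys ++ [z]) then paAttrStep st.1 (ys ++ [z]) else st.1),
        st.2 ++ [paF2 (paF1 (ys ++ [z]))]) := by
  have hE : PySem.Chars.endswith (ys ++ [z]) ['}'] = false := by
    rw [end1_eq]; exact hne
  have hlast : PySem.List.pyGet? (ys ++ [z]) (-1) = some z := by
    rw [PySem.List.pyGet?_neg_one]; simp
  have hpor : z = '.' ∨ z = ',' ∨ z = ':' ∨ z = ';' ∨ z = '?' ∨ z = '!' := by
    have h := hor; simp at h; tauto
  have hWp : paIsWrappedp ['{'] (ys ++ [z]) ['}'] = true := by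
    simp [paIsWrappedp, hO1, Bool.true_and, hE, Bool.false_or, List.singleton_append,
      end2_eq, hys, Bool.and_true]
    tauto
  have hWpo : paIsWrappedp ['<'] (ys ++ [z]) ['>'] = false := by
    simp only [paIsWrappedp, hO2, Bool.false_and]
  have hWP : paIsWrappedP ['{'] (ys ++ [z]) ['}'] = true := by
    simp [paIsWrappedP, hO1, Bool.true_and, List.singleton_append,
      end2_eq, hys, Bool.and_true]
    tauto
  have hWPo : paIsWrappedP ['<'] (ys ++ [z]) ['>'] = false := by
    simp only [paIsWrappedP, hO2, Bool.false_and]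
  have hblk : pvIsBlock '{' '}' (ys ++ [z]) = true := by
    simp [pvIsBlock, hO1, Bool.true_and, hE, Bool.false_or, pvPunct, List.any_cons,
      List.any_nil, end2_eq, hys, Bool.and_true, Bool.or_false]
    tauto
  have hant : ((pvIsBlock '{' '}' (ys ++ [z]) || pvIsBlock '<' '>' (ys ++ [z])) &&
      PySem.Chars.isIn ['='] (ys ++ [z])) = true := by
    simp [hblk, hEq]
  obtain ⟨hLen, -⟩ := hP hant
  have hanyP : pvPunct.any (fun p => PySem.Chars.endswith (ys ++ [z]) [p]) = true := by
    simp [pvPunct, List.any_cons, List.any_nil, end1_eq, Bool.or_false]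
    tauto
  have hpi : pvInner (ys ++ [z]) = PySem.List.slice (ys ++ [z]) (some 1) (some (-2)) := by
    simp [pvInner, hanyP]
  rw [hpi] at hLen
  rcases hsp : PySem.Chars.splitOn (PySem.List.slice (ys ++ [z]) (some 1) (some (-2))) ['='] with
    _ | ⟨k, _ | ⟨v, _ | ⟨x, t⟩⟩⟩ <;> rw [hsp] at hLen <;> simp at hLen
  have hslice : PySem.List.slice (ys ++ [z]) (some (-1)) none = [z] := by
    rw [PySem.List.slice_from_neg_one]; simp
  have hB : pbStep st (ys ++ [z]) = (st.1.insert k v, st.2 ++ ['{' :: k ++ ['}', z]]) := by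
    simp [pbStep, pbClassify, hEq, hO1, hO2, hE, hlast, hin, end2_eq, hys, hsp]
  have hcond : pvACond (ys ++ [z]) = true := by
    simp [pvACond, hWp, hWpo, hEq]
  have hpe : paPunctEnd (ys ++ [z]) = true := by
    simp [paPunctEnd, end1_eq]
    tauto
  have hA : paAttrStep st.1 (ys ++ [z]) = st.1.insert k v := by
    simp [paAttrStep, paUnwrapped, hpe, hsp]
  have hf1 : paF1 (ys ++ [z]) = ys ++ [z] := by
    simp [paF1, paIsWrapped, hO1, hO2, hE, end1_eq, hne]
  have hf2 : paF2 (ys ++ [z]) = '{' :: k ++ ['}', z] := by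
    simp [paF2, hWP, hWPo, hEq, hsp, PySem.List.pyGetD_zero_cons, hslice]
  rw [hB, hcond, hA, hf1, hf2]
  simp

theorem coreSuccAngle (st : PySem.Dict (List Char) (List Char) × List (List Char)) (ys : List Char) (z : Char)
    (hP : pvPreWord (ys ++ [z]))
    (hEq : PySem.Chars.isIn ['='] (ys ++ [z]) = true)
    (hO1 : PySem.Chars.startswith (ys ++ [z]) ['{'] = false)
    (hO2 : PySem.Chars.startswith (ys ++ [z]) ['<'] = true)
    (hys : PySem.Chars.endswith ys ['>'] = true)
    (hne : (z == '>') = false)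
    (hor : ((z == '.') || (z == ',') || (z == ':') || (z == ';') || (z == '?') || (z == '!')) = true)
    (hin : PySem.Chars.isIn [z] pbPunct.toList = true) :
    pbStep st (ys ++ [z]) =
      ((if pvACond (ys ++ [z]) then paAttrStep st.1 (ys ++ [z]) else st.1),
        st.2 ++ [paF2 (paF1 (ys ++ [z]))]) := by
  have hE : PySem.Chars.endswith (ys ++ [z]) ['>'] = false := by
    rw [end1_eq]; exact hne
  have hlast : PySem.List.pyGet? (ys ++ [z]) (-1) = some z := by
    rw [PySem.List.pyGet?_neg_one]; simp
  have hpor : z = '.' ∨ z = ',' ∨ z = ':' ∨ z = ';' ∨ z = '?' ∨ z = '!' := by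
    have h := hor; simp at h; tauto
  have hWp : paIsWrappedp ['<'] (ys ++ [z]) ['>'] = true := by
    simp [paIsWrappedp, hO2, Bool.true_and, hE, Bool.false_or, List.singleton_append,
      end2_eq, hys, Bool.and_true]
    tauto
  have hWpo : paIsWrappedp ['{'] (ys ++ [z]) ['}'] = false := by
    simp only [paIsWrappedp, hO1, Bool.false_and]
  have hWP : paIsWrappedP ['<'] (ys ++ [z]) ['>'] = true := by
    simp [paIsWrappedP, hO2, Bool.true_and, List.singleton_append,
      end2_eq, hys, Bool.and_true]
    tauto
  have hWPo : paIsWrappedP ['{'] (ys ++ [z]) ['}'] = false := by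
    simp only [paIsWrappedP, hO1, Bool.false_and]
  have hblk : pvIsBlock '<' '>' (ys ++ [z]) = true := by
    simp [pvIsBlock, hO2, Bool.true_and, hE, Bool.false_or, pvPunct, List.any_cons,
      List.any_nil, end2_eq, hys, Bool.and_true, Bool.or_false]
    tauto
  have hant : ((pvIsBlock '{' '}' (ys ++ [z]) || pvIsBlock '<' '>' (ys ++ [z])) &&
      PySem.Chars.isIn ['='] (ys ++ [z])) = true := by
    simp [hblk, hEq]
  obtain ⟨hLen, -⟩ := hP hant
  have hanyP : pvPunct.any (fun p => PySem.Chars.endswith (ys ++ [z]) [p]) = true := by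
    simp [pvPunct, List.any_cons, List.any_nil, end1_eq, Bool.or_false]
    tauto
  have hpi : pvInner (ys ++ [z]) = PySem.List.slice (ys ++ [z]) (some 1) (some (-2)) := by
    simp [pvInner, hanyP]
  rw [hpi] at hLen
  rcases hsp : PySem.Chars.splitOn (PySem.List.slice (ys ++ [z]) (some 1) (some (-2))) ['='] with
    _ | ⟨k, _ | ⟨v, _ | ⟨x, t⟩⟩⟩ <;> rw [hsp] at hLen <;> simp at hLen
  have hslice : PySem.List.slice (ys ++ [z]) (some (-1)) none = [z] := by
    rw [PySem.List.slice_from_neg_one]; simp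
  have hB : pbStep st (ys ++ [z]) = (st.1.insert k v, st.2 ++ ['{' :: k ++ ['}', z]]) := by
    simp [pbStep, pbClassify, hEq, hO1, hO2, hE, hlast, hin, end2_eq, hys, hsp]
  have hcond : pvACond (ys ++ [z]) = true := by
    simp [pvACond, hWp, hWpo, hEq]
  have hpe : paPunctEnd (ys ++ [z]) = true := by
    simp [paPunctEnd, end1_eq]
    tauto
  have hA : paAttrStep st.1 (ys ++ [z]) = st.1.insert k v := by
    simp [paAttrStep, paUnwrapped, hpe, hsp]
  have hf1 : paF1 (ys ++ [z]) = ys ++ [z] := by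
    simp [paF1, paIsWrapped, hO1, hO2, hE, end1_eq, hne]
  have hf2 : paF2 (ys ++ [z]) = '{' :: k ++ ['}', z] := by
    simp [paF2, hWP, hWPo, hEq, hsp, PySem.List.pyGetD_zero_cons, hslice]
  rw [hB, hcond, hA, hf1, hf2]
  simp

theorem core (st : PySem.Dict (List Char) (List Char) × List (List Char)) (ys : List Char) (z : Char)
    (hP : pvPreWord (ys ++ [z])) :
    pbStep st (ys ++ [z]) =
      ((if pvACond (ys ++ [z]) then paAttrStep st.1 (ys ++ [z]) else st.1),
        st.2 ++ [paF2 (paF1 (ys ++ [z]))]) := by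
  by_cases hEq : PySem.Chars.isIn ['='] (ys ++ [z]) = true
  case neg =>
    simp only [Bool.not_eq_true] at hEq
    simp [pbStep, pvACond, paF1, paF2, paIsWrapped, paIsWrappedP, hEq]
  case pos =>
  by_cases hO : PySem.Chars.startswith (ys ++ [z]) ['{'] = true
  case pos =>
    have hO1 : PySem.Chars.startswith (ys ++ [z]) ['{'] = true := hO
    have hO2 : PySem.Chars.startswith (ys ++ [z]) ['<'] = false := by
      cases h : PySem.Chars.startswith (ys ++ [z]) ['<'] with
      | false => rfl
      | true =>
        have h1 := (start1_iff _ _).mp hO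
        have h2 := (start1_iff _ _).mp h
        rw [h1] at h2; simp at h2
    by_cases hzc : z = '}'
    case pos =>
      subst hzc
      have hE : PySem.Chars.endswith (ys ++ ['}']) ['}'] = true := by rw [end1_eq]; simp
      have hant : ((pvIsBlock '{' '}' (ys ++ ['}']) || pvIsBlock '<' '>' (ys ++ ['}'])) &&
          PySem.Chars.isIn ['='] (ys ++ ['}'])) = true := by
        simp [pvIsBlock, hO1, hE, hEq]
      obtain ⟨hLen, -⟩ := hP hant
      have hpi : pvInner (ys ++ ['}']) = PySem.List.slice (ys ++ ['}']) (some 1) (some (-1)) := by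
        simp [pvInner, pvPunct, end1_eq]
      rw [hpi] at hLen
      rcases hsp : PySem.Chars.splitOn (PySem.List.slice (ys ++ ['}']) (some 1) (some (-1))) ['='] with
        _ | ⟨k, _ | ⟨v, _ | ⟨x, t⟩⟩⟩ <;> rw [hsp] at hLen <;> simp at hLen
      have hB : pbStep st (ys ++ ['}']) = (st.1.insert k v, st.2 ++ ['{' :: k ++ ['}']]) := by
        simp [pbStep, pbClassify, hEq, hO1, hO2, hE, hsp]
      have hcond : pvACond (ys ++ ['}']) = true := by
        simp [pvACond, paIsWrappedp, hO1, hE, hEq]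
      have hA : paAttrStep st.1 (ys ++ ['}']) = st.1.insert k v := by
        simp [paAttrStep, paUnwrapped, paPunctEnd, end1_eq, hsp]
      have hf1 : paF1 (ys ++ ['}']) = '{' :: k ++ ['}'] := by
        simp [paF1, paIsWrapped, hO1, hO2, hE, hEq, hsp, PySem.List.pyGetD_zero_cons]
      have hf2 : paF2 ('{' :: k ++ ['}']) = '{' :: k ++ ['}'] := by
        have h1 : ∀ e p : Char, PySem.Chars.endswith ('{' :: (k ++ ['}'])) [e, p] =
            ((('}' : Char) == p) && PySem.Chars.endswith ('{' :: k) [e]) := by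
          intro e p
          rw [show '{' :: (k ++ ['}']) = ('{' :: k) ++ ['}'] by simp, end2_eq]
        simp [paF2, paIsWrappedP, start1_cons, h1]
      rw [hB, hcond, hA, hf1, hf2]
      simp
    case neg =>
      have hE : PySem.Chars.endswith (ys ++ [z]) ['}'] = false := by
        rw [end1_eq]; simp [hzc]
      have hlast : PySem.List.pyGet? (ys ++ [z]) (-1) = some z := by
        rw [PySem.List.pyGet?_neg_one]; simp
      by_cases hmem : z ∈ pvPunct
      case pos =>
        by_cases hys : PySem.Chars.endswith ys ['}'] = true
        case pos =>
          simp only [pvPunct, List.mem_cons, List.not_mem_nil, or_false] at hmem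
          rcases hmem with rfl | rfl | rfl | rfl | rfl | rfl <;>
            exact coreSuccBrace st ys _ hP hEq hO1 hO2 hys (by decide) (by decide) (by decide)
        case neg =>
          simp only [Bool.not_eq_true] at hys
          have hB : pbStep st (ys ++ [z]) = (st.1, st.2 ++ [ys ++ [z]]) := by
            simp [pbStep, pbClassify, hEq, hO1, hO2, hE, hlast, end2_eq, hys]
          have hcond : pvACond (ys ++ [z]) = false := by
            simp [pvACond, paIsWrappedp, hO1, hO2, hE, end2_eq, hys]
          have hf1 : paF1 (ys ++ [z]) = ys ++ [z] := by
            simp [paF1, paIsWrapped, hO1, hO2, hE]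
          have hf2 : paF2 (ys ++ [z]) = ys ++ [z] := by
            simp [paF2, paIsWrappedP, hO1, hO2, end2_eq, hys]
          rw [hB, hcond, hf1, hf2]
          simp
      case neg =>
        simp only [pvPunct, List.mem_cons, List.not_mem_nil, or_false, not_or] at hmem
        obtain ⟨hz1, hz2, hz3, hz4, hz5, hz6⟩ := hmem
        have hnin : PySem.Chars.isIn [z] pbPunct.toList = false := by
          rcases h1 : PySem.Chars.isIn [z] pbPunct.toList with _ | _
          · rfl
          · have := (isIn_singleton _ _).mp h1
            simp [pbPunct] at this
            rcases this with rfl | rfl | rfl | rfl | rfl | rfl <;> simp at hz1 hz2 hz3 hz4 hz5 hz6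
        have hB : pbStep st (ys ++ [z]) = (st.1, st.2 ++ [ys ++ [z]]) := by
          simp [pbStep, pbClassify, hEq, hO1, hO2, hE, hlast, hnin]
        have hcond : pvACond (ys ++ [z]) = false := by
          simp [pvACond, paIsWrappedp, hO1, hO2, hE, end2_eq, hz1, hz2, hz3, hz4, hz5, hz6]
        have hf1 : paF1 (ys ++ [z]) = ys ++ [z] := by
          simp [paF1, paIsWrapped, hO1, hO2, hE]
        have hf2 : paF2 (ys ++ [z]) = ys ++ [z] := by
          simp [paF2, paIsWrappedP, hO1, hO2, end2_eq, hz1, hz2, hz3, hz4, hz5, hz6]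
        rw [hB, hcond, hf1, hf2]
        simp
  case neg =>
    simp only [Bool.not_eq_true] at hO
    have hO1 : PySem.Chars.startswith (ys ++ [z]) ['{'] = false := hO
    by_cases hOb : PySem.Chars.startswith (ys ++ [z]) ['<'] = true
    case pos =>
      have hO2 : PySem.Chars.startswith (ys ++ [z]) ['<'] = true := hOb
      by_cases hzc : z = '>'
      case pos =>
        subst hzc
        have hE : PySem.Chars.endswith (ys ++ ['>']) ['>'] = true := by rw [end1_eq]; simp
        have hant : ((pvIsBlock '{' '}' (ys ++ ['>']) || pvIsBlock '<' '>' (ys ++ ['>'])) &&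
            PySem.Chars.isIn ['='] (ys ++ ['>'])) = true := by
          simp [pvIsBlock, hO2, hE, hEq]
        obtain ⟨hLen, -⟩ := hP hant
        have hpi : pvInner (ys ++ ['>']) = PySem.List.slice (ys ++ ['>']) (some 1) (some (-1)) := by
          simp [pvInner, pvPunct, end1_eq]
        rw [hpi] at hLen
        rcases hsp : PySem.Chars.splitOn (PySem.List.slice (ys ++ ['>']) (some 1) (some (-1))) ['='] with
          _ | ⟨k, _ | ⟨v, _ | ⟨x, t⟩⟩⟩ <;> rw [hsp] at hLen <;> simp at hLen
        have hB : pbStep st (ys ++ ['>']) = (st.1.insert k v, st.2 ++ ['{' :: k ++ ['}']]) := by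
          simp [pbStep, pbClassify, hEq, hO1, hO2, hE, hsp]
        have hcond : pvACond (ys ++ ['>']) = true := by
          simp [pvACond, paIsWrappedp, hO2, hE, hEq]
        have hA : paAttrStep st.1 (ys ++ ['>']) = st.1.insert k v := by
          simp [paAttrStep, paUnwrapped, paPunctEnd, end1_eq, hsp]
        have hf1 : paF1 (ys ++ ['>']) = '{' :: k ++ ['}'] := by
          simp [paF1, paIsWrapped, hO1, hO2, hE, hEq, hsp, PySem.List.pyGetD_zero_cons]
        have hf2 : paF2 ('{' :: k ++ ['}']) = '{' :: k ++ ['}'] := by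
          have h1 : ∀ e p : Char, PySem.Chars.endswith ('{' :: (k ++ ['}'])) [e, p] =
              ((('}' : Char) == p) && PySem.Chars.endswith ('{' :: k) [e]) := by
            intro e p
            rw [show '{' :: (k ++ ['}']) = ('{' :: k) ++ ['}'] by simp, end2_eq]
          simp [paF2, paIsWrappedP, start1_cons, h1]
        rw [hB, hcond, hA, hf1, hf2]
        simp
      case neg =>
        have hE : PySem.Chars.endswith (ys ++ [z]) ['>'] = false := by
          rw [end1_eq]; simp [hzc]
        have hlast : PySem.List.pyGet? (ys ++ [z]) (-1) = some z := by
          rw [PySem.List.pyGet?_neg_one]; simp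
        by_cases hmem : z ∈ pvPunct
        case pos =>
          by_cases hys : PySem.Chars.endswith ys ['>'] = true
          case pos =>
            simp only [pvPunct, List.mem_cons, List.not_mem_nil, or_false] at hmem
            rcases hmem with rfl | rfl | rfl | rfl | rfl | rfl <;>
              exact coreSuccAngle st ys _ hP hEq hO1 hO2 hys (by decide) (by decide) (by decide)
          case neg =>
            simp only [Bool.not_eq_true] at hys
            have hB : pbStep st (ys ++ [z]) = (st.1, st.2 ++ [ys ++ [z]]) := by
              simp [pbStep, pbClassify, hEq, hO1, hO2, hE, hlast, end2_eq, hys]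
            have hcond : pvACond (ys ++ [z]) = false := by
              simp [pvACond, paIsWrappedp, hO1, hO2, hE, end2_eq, hys]
            have hf1 : paF1 (ys ++ [z]) = ys ++ [z] := by
              simp [paF1, paIsWrapped, hO1, hO2, hE]
            have hf2 : paF2 (ys ++ [z]) = ys ++ [z] := by
              simp [paF2, paIsWrappedP, hO1, hO2, end2_eq, hys]
            rw [hB, hcond, hf1, hf2]
            simp
        case neg =>
          simp only [pvPunct, List.mem_cons, List.not_mem_nil, or_false, not_or] at hmem
          obtain ⟨hz1, hz2, hz3, hz4, hz5, hz6⟩ := hmem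
          have hnin : PySem.Chars.isIn [z] pbPunct.toList = false := by
            rcases h1 : PySem.Chars.isIn [z] pbPunct.toList with _ | _
            · rfl
            · have := (isIn_singleton _ _).mp h1
              simp [pbPunct] at this
              rcases this with rfl | rfl | rfl | rfl | rfl | rfl <;> simp at hz1 hz2 hz3 hz4 hz5 hz6
          have hB : pbStep st (ys ++ [z]) = (st.1, st.2 ++ [ys ++ [z]]) := by
            simp [pbStep, pbClassify, hEq, hO1, hO2, hE, hlast, hnin]
          have hcond : pvACond (ys ++ [z]) = false := by
            simp [pvACond, paIsWrappedp, hO1, hO2, hE, end2_eq, hz1, hz2, hz3, hz4, hz5, hz6]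
          have hf1 : paF1 (ys ++ [z]) = ys ++ [z] := by
            simp [paF1, paIsWrapped, hO1, hO2, hE]
          have hf2 : paF2 (ys ++ [z]) = ys ++ [z] := by
            simp [paF2, paIsWrappedP, hO1, hO2, end2_eq, hz1, hz2, hz3, hz4, hz5, hz6]
          rw [hB, hcond, hf1, hf2]
          simp
    case neg =>
      simp only [Bool.not_eq_true] at hOb
      have hO2 : PySem.Chars.startswith (ys ++ [z]) ['<'] = false := hOb
      have hB : pbStep st (ys ++ [z]) = (st.1, st.2 ++ [ys ++ [z]]) := by
        simp [pbStep, hEq, hO1, hO2]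
      have hcond : pvACond (ys ++ [z]) = false := by
        simp [pvACond, paIsWrappedp, hO1, hO2]
      have hf1 : paF1 (ys ++ [z]) = ys ++ [z] := by
        simp [paF1, paIsWrapped, hO1, hO2]
      have hf2 : paF2 (ys ++ [z]) = ys ++ [z] := by
        simp [paF2, paIsWrappedP, hO1, hO2]
      rw [hB, hcond, hf1, hf2]
      simp

theorem foldWords : ∀ (ws : List (List Char)) (d : PySem.Dict (List Char) (List Char))
    (out : List (List Char)), (∀ w ∈ ws, w ≠ [] ∧ pvPreWord w) →
    ws.foldl pbStep (d, out) =
      ((ws.filter (fun w => (paIsWrappedp ['{'] w ['}'] || paIsWrappedp ['<'] w ['>']) &&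
          PySem.Chars.isIn ['='] w)).foldl paAttrStep d,
        out ++ ws.map (fun w => paF2 (paF1 w))) := by
  intro ws
  induction ws with
  | nil => intro d out h; simp
  | cons w ws ih =>
    intro d out h
    obtain ⟨hne, hP⟩ := h w (by simp)
    rcases List.eq_nil_or_concat' w with rfl | ⟨ys, z, rfl⟩
    · exact absurd rfl hne
    · rw [List.foldl_cons, core (d, out) ys z hP]
      rw [ih _ _ (fun x hx => h x (by simp [hx]))]
      rcases hc : pvACond (ys ++ [z]) with _ | _
      · have hc' : ((paIsWrappedp ['{'] (ys ++ [z]) ['}'] || paIsWrappedp ['<'] (ys ++ [z]) ['>']) &&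
            PySem.Chars.isIn ['='] (ys ++ [z])) = false := hc
        simp [hc, hc', List.filter_cons]
      · have hc' : ((paIsWrappedp ['{'] (ys ++ [z]) ['}'] || paIsWrappedp ['<'] (ys ++ [z]) ['>']) &&
            PySem.Chars.isIn ['='] (ys ++ [z])) = true := hc
        simp [hc, hc', List.filter_cons]

theorem attr_nodup : ∀ (l : List (List Char)) (d : PySem.Dict (List Char) (List Char)),
    d.keys.Nodup → (l.foldl paAttrStep d).keys.Nodup := by
  intro l
  induction l with
  | nil => intro d h; simpa using h
  | cons kv l ih =>
    intro d h
    rw [List.foldl_cons]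
    refine ih _ ?_
    unfold paAttrStep
    split
    · exact PySem.Dict.nodup_keys_insert _ _ _ h
    · exact h

theorem derive_eq (attr : PySem.Dict (List Char) (List Char)) :
    ∀ (l : List ((List Char) × (List Char))) (p0 : PySem.Dict (List Char) (List Char)),
    (∀ kv ∈ l, attr.getD kv.1 [] = kv.2) →
    (l.map Prod.fst).foldl (paDeriveStep attr) p0 = l.foldl (pbDeriveStep attr) p0 := by
  intro l
  induction l with
  | nil => intro p0 h; simp
  | cons kv l ih =>
    intro p0 h
    have h1 := h kv (by simp)
    rw [List.map_cons, List.foldl_cons, List.foldl_cons]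
    rw [show paDeriveStep attr p0 kv.1 = pbDeriveStep attr p0 kv from ?_]
    · exact ih _ (fun x hx => h x (by simp [hx]))
    · unfold paDeriveStep pbDeriveStep
      rw [h1]


theorem splitOn_go_sub (sep : List Char) : ∀ (fuel : Nat) (l cur : List Char) (acc : List (List Char))
    (p : List Char), p ∈ PySem.Chars.splitOn.go sep fuel l cur acc →
    ∀ c ∈ p, c ∈ l ∨ c ∈ cur ∨ ∃ q ∈ acc, c ∈ q := by
  intro fuel
  induction fuel with
  | zero =>
    intro l cur acc p hp c hc
    simp only [PySem.Chars.splitOn.go] at hp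
    simp at hp
    rcases hp with h | h
    · exact Or.inr (Or.inr ⟨p, h, hc⟩)
    · subst h; simp at hc
      rcases hc with h | h
      · exact Or.inr (Or.inl h)
      · exact Or.inl h
  | succ fuel ih =>
    intro l cur acc p hp c hc
    match l with
    | [] =>
      simp only [PySem.Chars.splitOn.go] at hp
      simp at hp
      rcases hp with h | h
      · exact Or.inr (Or.inr ⟨p, h, hc⟩)
      · subst h; simp at hc; exact Or.inr (Or.inl hc)
    | x :: rest =>
      simp only [PySem.Chars.splitOn.go] at hp
      split at hp
      · rcases ih _ [] _ p hp c hc with h | h | ⟨q, hq, hcq⟩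
        · exact Or.inl (List.mem_of_mem_drop h)
        · simp at h
        · simp at hq
          rcases hq with h | h
          · subst h; simp at hcq; exact Or.inr (Or.inl hcq)
          · exact Or.inr (Or.inr ⟨q, h, hcq⟩)
      · rcases ih rest (x :: cur) acc p hp c hc with h | h | h
        · exact Or.inl (by simp [h])
        · simp at h
          rcases h with h | h
          · exact Or.inl (by simp [h])
          · exact Or.inr (Or.inl h)
        · exact Or.inr (Or.inr h)

theorem splitOn_sub (s sep : List Char) (p : List Char) (hp : p ∈ PySem.Chars.splitOn s sep)
    (c : Char) (hc : c ∈ p) : c ∈ s := by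
  have := splitOn_go_sub sep (s.length + 1) s [] [] p (by simpa [PySem.Chars.splitOn] using hp) c hc
  simpa using this

-- last-char facts


theorem key_sub (parts : List (List Char)) (c : Char)
    (hc : c ∈ PySem.List.pyGetD parts 0 ([] : List Char)) : ∃ p ∈ parts, c ∈ p := by
  cases parts with
  | nil => simp [PySem.List.pyGetD, PySem.List.pyGet?] at hc
  | cons p ps =>
    rw [PySem.List.pyGetD_zero_cons] at hc
    exact ⟨p, by simp, hc⟩

theorem f1_good (w : List Char) (hw : Good w) : Good (paF1 w) := by
  unfold paF1
  split
  · constructor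
    · simp
    · intro c hc
      simp only [List.mem_cons, List.mem_append, List.mem_singleton] at hc
      rcases hc with (rfl | hc) | (rfl | h0)
      · decide
      · obtain ⟨p, hp, hcp⟩ := key_sub _ _ hc
        have h1 := splitOn_sub _ _ _ hp _ hcp
        have h2 := PySem.List.mem_of_mem_slice _ _ _ h1
        exact hw.2 _ h2
      · decide
      · simp at h0
  · exact hw

theorem main (sentence : String) (hpre : Pre_process_attr_values sentence) :
    process_attr_values sentence = process_attr_values_alt sentence := by
  simp only [process_attr_values, process_attr_values_alt]
  have hgood : ∀ w ∈ PySem.Chars.split₀ sentence.toList, Good w := split₀_good _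
  have hws : ∀ w ∈ PySem.Chars.split₀ sentence.toList, w ≠ [] ∧ pvPreWord w :=
    fun w hw => ⟨(hgood w hw).1, hpre w hw⟩
  rw [foldWords _ PySem.Dict.empty [] hws]
  have hnod : ((PySem.Chars.split₀ sentence.toList).filter
      (fun w => (paIsWrappedp ['{'] w ['}'] || paIsWrappedp ['<'] w ['>']) &&
        PySem.Chars.isIn ['='] w)).foldl paAttrStep PySem.Dict.empty
      |>.keys.Nodup := by
    apply attr_nodup
    simp
  have hgood1 : ∀ u ∈ (PySem.Chars.split₀ sentence.toList).map paF1, Good u := by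
    intro u hu
    obtain ⟨w, hw, rfl⟩ := List.mem_map.mp hu
    exact f1_good w (hgood w hw)
  rw [split₀_join _ hgood1, List.map_map]
  set attrA := (PySem.Chars.split₀ sentence.toList).filter
      (fun w => (paIsWrappedp ['{'] w ['}'] || paIsWrappedp ['<'] w ['>']) &&
        PySem.Chars.isIn ['='] w) |>.foldl paAttrStep PySem.Dict.empty with hAdef
  rw [show attrA.keys = attrA.items.map Prod.fst from rfl]
  rw [derive_eq _ _ _ (fun kv hkv => PySem.Dict.getD_of_mem_items _ hkv hnod [])]
  rfl

-- ===== VERDICT (by name: the statement is the Claim_ definition above) =====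
theorem process_attr_values_spec : Claim_equal_process_attr_values := by
  intro sentence _ hpre
  exact main sentence hpre
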